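/- GENERATED by farm/worked/mk_tree_copies.py from farm/worked/imdct_step3_iter0_loop.COMPOSITION/Proof.lean (a worked proof of the farm's unit `imdct_step3_iter0_loop.COMPOSITION`,
   accepted by the verdict) — do not edit. -/
import Vorbis.Spec.Units.imdct_step3_iter0_loop_COMPOSITION

/- THE COMPOSITION OF imdct_step3_iter0_loop (S8's proof, in the farm's format): the segment statements give the function's contract, by
   `ReachVia.trans` and an induction on the measure the loop head's assertion carries. No machine code is walked. -/
open X86 X86.User Asan Vorbis Vorbis.Spec

namespace Vorbis.Spec.Worked.imdct_step3_iter0_loop_COMPOSITION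
open Vorbis.Spec.imdct_step3_iter0_loop_COMPOSITION (Statement)

/-- From the loop head after `t` iterations the function returns: induction on the measure `m − t`. -/
theorem imdct_step3_iter0_loop_from_head_w {Lay : Layout} {μ : Microarch} {u₀ : State}
    (hseg2 : imdct_step3_iter0_loop.Seg2 Lay μ u₀) (hseg3 : imdct_step3_iter0_loop.Seg3 Lay μ u₀)
    (hseg4 : imdct_step3_iter0_loop.Seg4 Lay μ u₀)
    (others : List Obj) (frames : List (Nat × FrameLayout)) (len i0 koff : Nat) (ue : State) (ret : Word) :
    ∀ (k t : Nat) (v : State), quarter ue - t = k →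
      imdct_step3_iter0_loop.AtHead u₀ others frames len i0 koff ue ret t v →
      ReachVia Lay μ WayInv v (Returned (conv u₀) (imdct_step3_iter0_loop.spec others frames len i0 koff) ue ret) := by
  intro k
  induction k with
  | zero =>
    intro t v hk hv
    apply (hseg4 others frames len i0 koff ue ret t v hv).trans
    intro w hw
    rcases hw with hbody | hret
    · obtain ⟨_, _, hlt⟩ := hbody
      omega
    · exact ReachVia.done hret
  | succ k ih =>
    intro t v hk hv
    apply (hseg4 others frames len i0 koff ue ret t v hv).trans
    intro w hw
    rcases hw with hbody | hret
    · have hlt := hbody.2.2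
      apply (hseg2 others frames len i0 koff ue ret t w hbody).trans
      intro x hx
      apply (hseg3 others frames len i0 koff ue ret t x hx).trans
      intro y hy
      exact ih (t + 1) y (by omega) hy
    · exact ReachVia.done hret

end Vorbis.Spec.Worked.imdct_step3_iter0_loop_COMPOSITION

theorem Vorbis.Spec.Worked.imdct_step3_iter0_loop_COMPOSITION_ok : Vorbis.Spec.imdct_step3_iter0_loop_COMPOSITION.Statement := by
  intro Lay hLay μ hμ u₀ hseg1 hseg2 hseg3 hseg4 others frames len i0 koff u ret he hpre
  apply (hseg1 others frames len i0 koff u ret he hpre).trans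
  intro v hv
  exact Vorbis.Spec.Worked.imdct_step3_iter0_loop_COMPOSITION.imdct_step3_iter0_loop_from_head_w hseg2 hseg3 hseg4 others frames len i0 koff u ret _ 0 v rfl hv
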